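-- pv_equiv track=rewrite | github.com/ShawnZhong/CS759-Spring-2020-Final-Project | path_opt/main.py | getminimal
-- ===== SOURCE A (Python) =====
-- def getminimal(terms):
--     c = 'a'
--     skip = [',', "-", ">"]
--     dict = {x : x for x in skip}
--     for x in terms:
--         if x not in skip and x not in dict:
--             dict[x] = c
--             c = chr(ord(c) + 1)
--     return ''.join(dict[c] for c in terms)
-- ===== SOURCE B (Python) =====
-- def getminimal(terms):
--     skip = {',', '-', '>'}
--     first = {x: i for i, x in reversed(list(enumerate(terms)))}
--     order = sorted(set(terms) - skip, key=first.__getitem__)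
--     label = {x: chr(ord('a') + i) for i, x in enumerate(order)}
--     return ''.join(label.get(x, x) for x in terms)
-- ===== Notes on version B (the rewrite author's own statement) =====
-- stated objective: alternative
-- what changed: A streams over terms with an incrementing label counter, classifying each element and mutating a skip-seeded dict; B instead recovers the first-occurrence order globally - a first-index dict from a reversed enumerate comprehension, sorted(set(terms)-skip) by that first index, a label table built in one comprehension over the sorted order - and emits with label.get(x, x): no counter, no conditional classification loop.
import Mathlib
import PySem

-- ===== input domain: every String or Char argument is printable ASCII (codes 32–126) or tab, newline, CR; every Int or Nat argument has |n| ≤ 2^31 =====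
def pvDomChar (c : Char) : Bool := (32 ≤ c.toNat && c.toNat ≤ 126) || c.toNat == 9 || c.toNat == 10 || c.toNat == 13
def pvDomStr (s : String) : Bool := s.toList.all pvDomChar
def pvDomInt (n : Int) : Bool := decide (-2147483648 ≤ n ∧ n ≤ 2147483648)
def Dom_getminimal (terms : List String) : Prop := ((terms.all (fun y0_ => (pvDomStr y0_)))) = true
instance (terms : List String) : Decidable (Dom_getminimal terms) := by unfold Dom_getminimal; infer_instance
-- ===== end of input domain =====

-- B replaces A's streaming counter loop by sort-distinct-terms-by-first-index + a label table built by comprehension (objective: alternative).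


-- ===== PORT A =====
-- chr(n): exact for n a valid scalar value below 0xD800 (Pre_ keeps every call in that range)
def pyChr (n : Nat) : String := String.ofList [Char.ofNat n]
-- ord(s) for the one-character strings c used here (c is always a single character under Pre_)
def pyOrd (s : String) : Nat := (s.toList.headD 'a').toNat

-- loop body of A: 'if x not in skip and x not in dict: dict[x] = c; c = chr(ord(c) + 1)'
def stepA (st : PySem.Dict String String × String) (x : String) :
    PySem.Dict String String × String :=
  if !([",", "-", ">"].contains x) && !(st.1.contains x) then
    (st.1.insert x st.2, pyChr (pyOrd st.2 + 1))
  else st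

def getminimal (terms : List String) : String :=
  let skip : List String := [",", "-", ">"]
  let d0 : PySem.Dict String String := skip.foldl (fun d x => d.insert x x) PySem.Dict.empty
  let st := terms.foldl stepA (d0, "a")
  -- dict[c] in the join: the key is always present (skip keys pre-seeded, all others inserted), so KeyError is impossible
  PySem.Str.join "" (terms.map (fun x => (st.1.get? x).getD ""))

-- ===== PORT B =====
-- first = {x: i for i, x in reversed(list(enumerate(terms)))}
def firstDict (terms : List String) : PySem.Dict String Int :=
  ((PySem.List.enumerate terms).reverse).foldl (fun d p => d.insert p.2 p.1) PySem.Dict.empty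

-- key=first.__getitem__: the key is always present (the sorted elements come from set(terms)), so KeyError is impossible
def bKey (terms : List String) (x : String) : Int := ((firstDict terms).get? x).getD 0

def getminimal_alt (terms : List String) : String :=
  let skip := PySem.Set.ofList [",", "-", ">"]
  let order := PySem.List.sorted (PySem.Set.diff (PySem.Set.ofList terms) skip) (bKey terms) false
  let label := (PySem.List.enumerate order).foldl
      (fun d p => d.insert p.2 (pyChr ('a'.toNat + p.1.toNat))) PySem.Dict.empty
  PySem.Str.join "" (terms.map (fun x => (label.get? x).getD x))

-- ===== PRECONDITION & SPEC =====
-- Pre_ excludes only inputs with ≥ 55199 DISTINCT non-skip terms: there A's incremental chr labels reach the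
-- surrogate range U+D800.. — code points that are not valid Lean Chars, so A's returned string is not a value of
-- the Lean type String (and past 1114015 distinct terms Python's chr raises ValueError). No input with fewer than
-- 55199 elements is excluded.
def Pre_getminimal (terms : List String) : Prop :=
  97 + (PySem.List.dedup (terms.filter (fun x => !([",", "-", ">"].contains x)))).length < 55296
instance (terms : List String) : Decidable (Pre_getminimal terms) := by
  unfold Pre_getminimal; infer_instance

def pvWitness_getminimal : List String := ["x", "y", ",", "x", "->", "y"]

def Spec_getminimal (terms : List String) (out : String) : Prop := out = getminimal_alt terms
instance (terms : List String) (out : String) : Decidable (Spec_getminimal terms out) := by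
  unfold Spec_getminimal; infer_instance

-- ===== CLAIM (what is proved, stated in full; the proofs are below) =====
def Claim_equal_getminimal : Prop :=
  ∀ (terms : List String), Dom_getminimal terms → Pre_getminimal terms →
    Spec_getminimal terms (getminimal terms)

-- ===== LEMMAS AND PROOFS =====

-- distinct non-skip terms of a prefix, in order of first occurrence
def dedupNS (p : List String) : List String :=
  PySem.List.dedup (p.filter (fun x => !([",", "-", ">"].contains x)))

-- A's seeded dict {x: x for x in skip}
def d0A : PySem.Dict String String :=
  [",", "-", ">"].foldl (fun d x => d.insert x x) PySem.Dict.empty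

-- invariant of A's fold: the dict maps skip chars to themselves and each seen non-skip term
-- to the label at its first-occurrence rank; the counter is the next label
def InvA (p : List String) : Prop :=
  (∀ k : String, (p.foldl stepA (d0A, "a")).1.get? k =
      if [",", "-", ">"].contains k then some k
      else (PySem.List.index? (dedupNS p) k).map (fun i => pyChr (97 + i)))
  ∧ (p.foldl stepA (d0A, "a")).2 = pyChr (97 + (dedupNS p).length)

lemma pyOrd_pyChr (n : Nat) (h : n < 55296) : pyOrd (pyChr n) = n := by
  have hv : n.isValidChar := Or.inl h
  simp [pyOrd, pyChr, Char.ofNat, hv]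

lemma invA_nil : InvA [] := by
  refine ⟨?_, by decide⟩
  intro k
  simp only [List.foldl_nil]
  by_cases h1 : k = "," <;> by_cases h2 : k = "-" <;> by_cases h3 : k = ">" <;>
    simp_all [d0A, dedupNS, PySem.Dict.get?_insert]

lemma dedupNS_append_skip (p : List String) (x : String)
    (hx : ([",", "-", ">"] : List String).contains x = true) :
    dedupNS (p ++ [x]) = dedupNS p := by
  have hxb : (!([",", "-", ">"].contains x)) = false := by rw [hx]; rfl
  unfold dedupNS
  rw [List.filter_append]
  have hfx : List.filter (fun y => !([",", "-", ">"].contains y)) [x] = [] := by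
    simp only [List.filter_cons, List.filter_nil, hxb]
    rfl
  rw [hfx, List.append_nil]

lemma dedupNS_append_mem (p : List String) (x : String)
    (hx : ([",", "-", ">"] : List String).contains x = false)
    (hm : x ∈ dedupNS p) :
    dedupNS (p ++ [x]) = dedupNS p := by
  have hxb : (!([",", "-", ">"].contains x)) = true := by rw [hx]; rfl
  unfold dedupNS at hm ⊢
  rw [PySem.List.dedup_eq_ofList] at hm
  rw [List.filter_append, PySem.List.dedup_eq_ofList, PySem.List.dedup_eq_ofList]
  have hfx : List.filter (fun y => !([",", "-", ">"].contains y)) [x] = [x] := by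
    simp only [List.filter_cons, List.filter_nil, hxb]
    rfl
  rw [hfx, PySem.Set.ofList_append_singleton, PySem.Set.add_of_mem hm]

lemma dedupNS_append_new (p : List String) (x : String)
    (hx : ([",", "-", ">"] : List String).contains x = false)
    (hm : x ∉ dedupNS p) :
    dedupNS (p ++ [x]) = dedupNS p ++ [x] := by
  have hxb : (!([",", "-", ">"].contains x)) = true := by rw [hx]; rfl
  unfold dedupNS at hm ⊢
  rw [PySem.List.dedup_eq_ofList] at hm
  rw [List.filter_append, PySem.List.dedup_eq_ofList, PySem.List.dedup_eq_ofList]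
  have hfx : List.filter (fun y => !([",", "-", ">"].contains y)) [x] = [x] := by
    simp only [List.filter_cons, List.filter_nil, hxb]
    rfl
  rw [hfx, PySem.Set.ofList_append_singleton, PySem.Set.add_of_not_mem hm]

lemma dedupNS_le_append (q r : List String) :
    (dedupNS q).length ≤ (dedupNS (q ++ r)).length := by
  simp only [dedupNS, List.filter_append, PySem.List.dedup_eq_ofList,
    PySem.Set.ofList_append, PySem.Set.update_eq_append_filter, List.length_append]
  omega

lemma mem_dedupNS_iff (p : List String) (x : String) :
    x ∈ dedupNS p ↔ x ∈ p ∧ ([",", "-", ">"] : List String).contains x = false := by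
  unfold dedupNS
  rw [PySem.List.mem_dedup, List.mem_filter]
  constructor
  · rintro ⟨h1, h2⟩; exact ⟨h1, by simpa using h2⟩
  · rintro ⟨h1, h2⟩; exact ⟨h1, by rw [h2]; rfl⟩

lemma invA_step (p : List String) (x : String)
    (hb : 97 + (dedupNS (p ++ [x])).length < 55296)
    (h : InvA p) : InvA (p ++ [x]) := by
  obtain ⟨h1, h2⟩ := h
  have hfa : (p ++ [x]).foldl stepA (d0A, "a")
      = stepA (p.foldl stepA (d0A, "a")) x := by simp
  set sA := p.foldl stepA (d0A, "a") with hsA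
  by_cases hskip : ([",", "-", ">"] : List String).contains x = true
  · have hA : stepA sA x = sA := by unfold stepA; rw [hskip]; simp
    unfold InvA
    rw [hfa, hA, dedupNS_append_skip p x hskip]
    exact ⟨h1, h2⟩
  · have hskip' : ([",", "-", ">"] : List String).contains x = false := by
      simpa using hskip
    by_cases hm : x ∈ dedupNS p
    · -- already labelled: A's state unchanged
      have hidx : (PySem.List.index? (dedupNS p) x).isSome :=
        (PySem.List.index?_isSome_iff _ _).mpr hm
      have hAc : sA.1.contains x = true := by
        rw [PySem.Dict.contains_eq_isSome_get?, h1 x, hskip']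
        obtain ⟨i, hi⟩ := Option.isSome_iff_exists.mp hidx
        rw [hi]; rfl
      have hA : stepA sA x = sA := by unfold stepA; rw [hAc]; simp
      unfold InvA
      rw [hfa, hA, dedupNS_append_mem p x hskip' hm]
      exact ⟨h1, h2⟩
    · -- fresh: A inserts (x, c) and bumps c
      have hidx : PySem.List.index? (dedupNS p) x = none :=
        (PySem.List.index?_eq_none_iff _ _).mpr hm
      have hAc : sA.1.contains x = false := by
        rw [PySem.Dict.contains_eq_isSome_get?, h1 x, hskip', hidx]; rfl
      have hA : stepA sA x = (sA.1.insert x sA.2, pyChr (pyOrd sA.2 + 1)) := by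
        unfold stepA; rw [hskip', hAc]; simp
      have hd' : dedupNS (p ++ [x]) = dedupNS p ++ [x] :=
        dedupNS_append_new p x hskip' hm
      have hbnd : 97 + (dedupNS p).length < 55296 := by
        rw [hd', List.length_append] at hb
        simp only [List.length_cons, List.length_nil] at hb
        omega
      unfold InvA
      rw [hfa, hA, hd']
      constructor
      · intro k
        by_cases hk : k = x
        · subst hk
          show (sA.1.insert k sA.2).get? k = _
          rw [PySem.Dict.get?_insert_self, hskip']
          simp only [Bool.false_eq_true, if_false]
          rw [PySem.List.index?_append_singleton_self (dedupNS p) k hm, h2]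
          rfl
        · show (sA.1.insert x sA.2).get? k = _
          rw [PySem.Dict.get?_insert_of_ne _ _ hk, h1 k]
          by_cases hks : ([",", "-", ">"] : List String).contains k = true
          · rw [hks]; rfl
          · have hks' : ([",", "-", ">"] : List String).contains k = false := by
              simpa using hks
            rw [hks']
            by_cases hkm : k ∈ dedupNS p
            · rw [PySem.List.index?_append_of_mem [x] hkm]
            · have hkm' : k ∉ dedupNS p ++ [x] := by
                intro hc
                rcases List.mem_append.mp hc with hc | hc
                · exact hkm hc
                · exact hk (List.mem_singleton.mp hc)
              rw [(PySem.List.index?_eq_none_iff _ _).mpr hkm,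
                (PySem.List.index?_eq_none_iff _ _).mpr hkm']
      · show pyChr (pyOrd sA.2 + 1) = pyChr (97 + (dedupNS p ++ [x]).length)
        rw [h2, pyOrd_pyChr _ hbnd, List.length_append]
        simp only [List.length_cons, List.length_nil]
        rfl

lemma invA_all (l : List String) : ∀ (p : List String),
    97 + (dedupNS (p ++ l)).length < 55296 → InvA p → InvA (p ++ l) := by
  induction l with
  | nil => intro p h hp; simpa using hp
  | cons x t ih =>
    intro p hb hp
    have hassoc : p ++ x :: t = (p ++ [x]) ++ t := by simp
    rw [hassoc] at hb ⊢
    refine ih (p ++ [x]) hb ?_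
    refine invA_step p x ?_ hp
    have := dedupNS_le_append (p ++ [x]) t
    omega

-- filter commutes with Python's first-occurrence dedup (set(xs) restricted by a predicate)
lemma filter_ofList {α : Type} [BEq α] [LawfulBEq α] (q : α → Bool) (xs : List α) :
    (PySem.Set.ofList xs).filter q = PySem.Set.ofList (xs.filter q) := by
  induction xs using List.reverseRecOn with
  | nil => rfl
  | append_singleton xs x ih =>
    rw [List.filter_append, PySem.Set.ofList_append_singleton]
    by_cases hx : x ∈ PySem.Set.ofList xs
    · rw [PySem.Set.add_of_mem hx, ih]
      by_cases hq : q x = true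
      · have hxf : x ∈ PySem.Set.ofList (xs.filter q) := by
          rw [PySem.Set.mem_ofList] at hx ⊢
          exact List.mem_filter.mpr ⟨hx, hq⟩
        simp only [List.filter_cons, List.filter_nil, hq, if_true]
        rw [PySem.Set.ofList_append_singleton, PySem.Set.add_of_mem hxf]
      · have hq' : q x = false := by simpa using hq
        simp only [List.filter_cons, List.filter_nil, hq', Bool.false_eq_true, if_false,
          List.append_nil]
    · rw [PySem.Set.add_of_not_mem hx, List.filter_append, ih]
      by_cases hq : q x = true
      · have hxf : x ∉ PySem.Set.ofList (xs.filter q) := by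
          rw [PySem.Set.mem_ofList] at hx ⊢
          intro hc; exact hx (List.mem_filter.mp hc).1
        simp only [List.filter_cons, List.filter_nil, hq, if_true]
        rw [PySem.Set.ofList_append_singleton, PySem.Set.add_of_not_mem hxf]
      · have hq' : q x = false := by simpa using hq
        simp only [List.filter_cons, List.filter_nil, hq', Bool.false_eq_true, if_false,
          List.append_nil]

-- the list B sorts is exactly the distinct non-skip terms in first-occurrence order
lemma diff_eq_dedupNS (terms : List String) :
    PySem.Set.diff (PySem.Set.ofList terms) (PySem.Set.ofList [",", "-", ">"])
      = dedupNS terms := by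
  have hsk : PySem.Set.ofList [",", "-", ">"] = ([",", "-", ">"] : List String) := by decide
  show (PySem.Set.ofList terms).filter
      (fun y => !(PySem.Set.ofList [",", "-", ">"]).contains y) = dedupNS terms
  rw [hsk]
  simp only [PySem.Set.contains_eq_listContains]
  rw [filter_ofList]
  rfl

-- proof-side first-index key (Nat form of B's key)
def nKey (terms : List String) (x : String) : Nat := (PySem.List.index? terms x).getD 0

lemma nKey_of_mem (p : List String) (x : String) (hx : x ∈ p) (t : List String) :
    nKey (p ++ t) x = nKey p x := by
  unfold nKey
  rw [PySem.List.index?_append_of_mem t hx]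

lemma nKey_lt_length (p : List String) (x : String) (hx : x ∈ p) :
    nKey p x < p.length := by
  obtain ⟨i, hi⟩ := Option.isSome_iff_exists.mp ((PySem.List.index?_isSome_iff p x).mpr hx)
  obtain ⟨hk, -, -⟩ := PySem.List.getElem_of_index?_eq_some hi
  unfold nKey
  rw [hi]
  exact hk

-- first-occurrence order is strictly increasing first index
lemma dedupNS_pairwise (terms : List String) :
    (dedupNS terms).Pairwise (fun a b => nKey terms a < nKey terms b) := by
  induction terms using List.reverseRecOn with
  | nil => simp [dedupNS, PySem.List.dedup]
  | append_singleton p x ih =>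
    by_cases hskip : ([",", "-", ">"] : List String).contains x = true
    · rw [dedupNS_append_skip p x hskip]
      refine List.Pairwise.imp_of_mem ?_ ih
      intro a b ha hb hab
      have hap : a ∈ p := ((mem_dedupNS_iff p a).mp ha).1
      have hbp : b ∈ p := ((mem_dedupNS_iff p b).mp hb).1
      rw [nKey_of_mem p a hap, nKey_of_mem p b hbp]
      exact hab
    · have hskip' : ([",", "-", ">"] : List String).contains x = false := by
        simpa using hskip
      by_cases hm : x ∈ dedupNS p
      · rw [dedupNS_append_mem p x hskip' hm]
        refine List.Pairwise.imp_of_mem ?_ ih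
        intro a b ha hb hab
        rw [nKey_of_mem p a ((mem_dedupNS_iff p a).mp ha).1,
          nKey_of_mem p b ((mem_dedupNS_iff p b).mp hb).1]
        exact hab
      · rw [dedupNS_append_new p x hskip' hm]
        have hxp : x ∉ p := by
          intro hc; exact hm ((mem_dedupNS_iff p x).mpr ⟨hc, hskip'⟩)
        have hkx : nKey (p ++ [x]) x = p.length := by
          unfold nKey
          rw [PySem.List.index?_append_singleton_self p x hxp]
          rfl
        rw [List.pairwise_append]
        refine ⟨?_, List.pairwise_singleton _ _, ?_⟩
        · refine List.Pairwise.imp_of_mem ?_ ih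
          intro a b ha hb hab
          rw [nKey_of_mem p a ((mem_dedupNS_iff p a).mp ha).1,
            nKey_of_mem p b ((mem_dedupNS_iff p b).mp hb).1]
          exact hab
        · intro a ha b hb
          rw [List.mem_singleton.mp hb, hkx,
            nKey_of_mem p a ((mem_dedupNS_iff p a).mp ha).1]
          exact nKey_lt_length p a ((mem_dedupNS_iff p a).mp ha).1

lemma nodup_dedupNS (p : List String) : (dedupNS p).Nodup := by
  unfold dedupNS
  rw [PySem.List.dedup_eq_ofList]
  exact PySem.Set.nodup_ofList _

-- B's first-index dict: folding inserts over the reversed enumeration keeps the FIRST index for each term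
lemma get?_foldr_insert_fst (l : List (Int × String)) (x : String) :
    (l.foldr (fun p d => d.insert p.2 p.1) (PySem.Dict.empty : PySem.Dict String Int)).get? x
      = (l.find? (fun p => p.2 == x)).map (·.1) := by
  induction l with
  | nil => rfl
  | cons p t ih =>
    simp only [List.foldr_cons, List.find?_cons]
    by_cases hp : p.2 = x
    · rw [show (p.2 == x) = true by simp [hp]]
      rw [← hp, PySem.Dict.get?_insert_self]
      rfl
    · rw [show (p.2 == x) = false by simp [hp]]
      rw [PySem.Dict.get?_insert_of_ne _ _ (fun h => hp h.symm), ih]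

lemma find?_enumerate_eq (ts : List String) (s : Int) (x : String) :
    (PySem.List.enumerate ts s).find? (fun p => p.2 == x)
      = (PySem.List.index? ts x).map (fun i : Nat => ((s + (i : Int), x) : Int × String)) := by
  induction ts generalizing s with
  | nil => rfl
  | cons y t ih =>
    rw [PySem.List.enumerate_cons, List.find?_cons]
    by_cases hy : y = x
    · subst hy
      rw [show ((((s, y) : Int × String)).2 == y) = true by simp, PySem.List.index?_cons_self]
      simp
    · rw [show ((((s, y) : Int × String)).2 == x) = false by simp [hy],
        PySem.List.index?_cons_of_ne _ hy, ih]
      cases PySem.List.index? t x with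
      | none => rfl
      | some i =>
        simp only [Option.map_some, Option.some.injEq, Prod.mk.injEq]
        refine ⟨by push_cast; ring, trivial⟩

lemma bKey_eq_nKey (terms : List String) (x : String) (hx : x ∈ terms) :
    bKey terms x = (nKey terms x : Int) := by
  obtain ⟨i, hi⟩ := Option.isSome_iff_exists.mp ((PySem.List.index?_isSome_iff terms x).mpr hx)
  unfold bKey nKey firstDict
  rw [List.foldl_reverse, get?_foldr_insert_fst, find?_enumerate_eq, hi]
  simp

lemma dedupNS_pairwise_int (terms : List String) :
    (dedupNS terms).Pairwise (fun a b => bKey terms a < bKey terms b) := by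
  refine List.Pairwise.imp_of_mem ?_ (dedupNS_pairwise terms)
  intro a b ha hb hab
  rw [bKey_eq_nKey terms a ((mem_dedupNS_iff terms a).mp ha).1,
    bKey_eq_nKey terms b ((mem_dedupNS_iff terms b).mp hb).1]
  exact_mod_cast hab

-- B's label dict looks up the first-occurrence rank
lemma label_get (order : List String) (hnd : order.Nodup) (k : String) :
    ((PySem.List.enumerate order).foldl
        (fun d p => d.insert p.2 (pyChr ('a'.toNat + p.1.toNat))) PySem.Dict.empty).get? k
      = (PySem.List.index? order k).map (fun i => pyChr (97 + i)) := by
  have hfresh : ∀ a ∈ PySem.List.enumerate order 0,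
      (PySem.Dict.empty : PySem.Dict String String).contains a.2 = false := fun a _ => rfl
  have hmapnd : ((PySem.List.enumerate order 0).map (fun p => p.2)).Nodup := by
    rw [PySem.List.map_snd_enumerate]; exact hnd
  have hitems := PySem.Dict.items_foldl_insert_fresh (PySem.List.enumerate order 0)
    (fun p => p.2) (fun p => pyChr ('a'.toNat + p.1.toNat)) PySem.Dict.empty hfresh hmapnd
  set label := (PySem.List.enumerate order).foldl
      (fun d p => d.insert p.2 (pyChr ('a'.toNat + p.1.toNat))) PySem.Dict.empty with hlabel
  have hit : label.items = (PySem.List.enumerate order 0).map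
      (fun p => ((p.2, pyChr ('a'.toNat + p.1.toNat)) : String × String)) := by
    simpa using hitems
  have hkeys : label.keys = order := by
    simp only [PySem.Dict.keys, hit, List.map_map]
    have hcomp : ((fun (q : String × String) => q.1) ∘
        (fun p : Int × String => ((p.2, pyChr ('a'.toNat + p.1.toNat)) : String × String)))
        = (fun p : Int × String => p.2) := rfl
    rw [hcomp, PySem.List.map_snd_enumerate]
  cases hio : PySem.List.index? order k with
  | none =>
    have hk : k ∉ order := (PySem.List.index?_eq_none_iff _ _).mp hio
    have hnone : label.get? k = none := by
      rw [PySem.Dict.get?_eq_none_iff_not_mem_keys, hkeys]; exact hk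
    rw [hnone]; rfl
  | some i =>
    obtain ⟨hi, hgi, -⟩ := PySem.List.getElem_of_index?_eq_some hio
    have hmem : ((0 + (i : Int), order[i]) : Int × String) ∈ PySem.List.enumerate order 0 :=
      (PySem.List.mem_enumerate_iff order 0 _).mpr ⟨i, hi, rfl⟩
    have hpair : ((k, pyChr (97 + i)) : String × String) ∈ label.items := by
      rw [hit]
      refine List.mem_map.mpr ⟨(0 + (i : Int), order[i]), hmem, ?_⟩
      simp [hgi]
    have hnk : label.keys.Nodup := by rw [hkeys]; exact hnd
    rw [(PySem.Dict.get?_eq_some_iff_mem_items label k _ hnk).mpr hpair]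
    rfl

-- ===== VERDICT (by name: the statement is the Claim_ definition above) =====
theorem getminimal_spec : Claim_equal_getminimal := by
  intro terms _hdom hpre
  have hb : 97 + (dedupNS terms).length < 55296 := by
    simpa [Pre_getminimal, dedupNS] using hpre
  have hinv := invA_all terms [] (by simpa using hb) invA_nil
  simp only [List.nil_append] at hinv
  obtain ⟨h1, -⟩ := hinv
  have horder : PySem.List.sorted
      (PySem.Set.diff (PySem.Set.ofList terms) (PySem.Set.ofList [",", "-", ">"]))
      (bKey terms) false = dedupNS terms := by
    rw [diff_eq_dedupNS]
    exact PySem.List.sorted_eq_of_perm_of_pairwise_lt _ _ _ (List.Perm.refl _)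
      (dedupNS_pairwise_int terms)
  show Spec_getminimal terms (getminimal terms)
  unfold Spec_getminimal getminimal getminimal_alt
  simp only [horder]
  rw [show (List.foldl (fun (d : PySem.Dict String String) x => d.insert x x)
      PySem.Dict.empty [",", "-", ">"]) = d0A from rfl]
  congr 1
  apply List.map_congr_left
  intro x hx
  rw [h1 x, label_get (dedupNS terms) (nodup_dedupNS terms) x]
  by_cases hs : ([",", "-", ">"] : List String).contains x = true
  · have hnm : x ∉ dedupNS terms := by
      rw [mem_dedupNS_iff]; rintro ⟨-, h⟩; rw [hs] at h; cases h
    rw [hs, (PySem.List.index?_eq_none_iff _ _).mpr hnm]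
    rfl
  · have hs' : ([",", "-", ">"] : List String).contains x = false := by simpa using hs
    have hm : x ∈ dedupNS terms := (mem_dedupNS_iff terms x).mpr ⟨hx, hs'⟩
    obtain ⟨i, hi⟩ := Option.isSome_iff_exists.mp ((PySem.List.index?_isSome_iff _ _).mpr hm)
    rw [hs', hi]
    rfl
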